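-- pv_equiv track=rewrite | github.com/ziemniak04/MSAalgorithm | msa.py | merge_alignments
-- ===== SOURCE A (Python) =====
-- from typing import List, Tuple, Dict
--
-- def merge_alignments(center_alignments: List[Tuple[str, str]]) -> List[str]:
--     """Merge all pairwise alignments with the center sequence into a multiple alignment."""
--     # Extract center sequence from the first alignment (it's consistent across all alignments)
--     center_seq = center_alignments[0][0]
--
--     # Initialize the multiple alignment with the center sequence
--     msa = [center_seq]
--
--     # Process each alignment with the center
--     for _, aligned_other in center_alignments:
--         # Create a new sequence that will be added to the MSA
--         new_seq = list('-' * len(center_seq))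
--
--         # Map the aligned_other to the center sequence positions
--         center_pos = 0
--         for i, char in enumerate(center_seq):
--             if char != '-':  # Not a gap in center
--                 if center_pos < len(aligned_other) and aligned_other[center_pos] != '-':
--                     new_seq[i] = aligned_other[center_pos]
--                 center_pos += 1
--
--         msa.append(''.join(new_seq))
--
--     return msa
-- ===== SOURCE B (Python) =====
-- def merge_alignments(center_alignments):
--     """Merge all pairwise alignments with the center sequence into a multiple alignment."""
--     center_seq = center_alignments[0][0]
--     # column indices of the center's non-gap positions, computed once
--     positions = [i for i, c in enumerate(center_seq) if c != '-']
--     msa = [center_seq]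
--     for _, other in center_alignments:
--         row = ['-'] * len(center_seq)
--         for col, ch in zip(positions, other):
--             if ch != '-':
--                 row[col] = ch
--         msa.append(''.join(row))
--     return msa
-- ===== Notes on version B (the rewrite author's own statement) =====
-- stated objective: simpler
-- what changed: B precomputes the center's non-gap column index table once and fills each row by zipping that table with the aligned sequence, replacing A's per-alignment rescan of the center with a running counter and an explicit bounds guard.
import Mathlib
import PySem

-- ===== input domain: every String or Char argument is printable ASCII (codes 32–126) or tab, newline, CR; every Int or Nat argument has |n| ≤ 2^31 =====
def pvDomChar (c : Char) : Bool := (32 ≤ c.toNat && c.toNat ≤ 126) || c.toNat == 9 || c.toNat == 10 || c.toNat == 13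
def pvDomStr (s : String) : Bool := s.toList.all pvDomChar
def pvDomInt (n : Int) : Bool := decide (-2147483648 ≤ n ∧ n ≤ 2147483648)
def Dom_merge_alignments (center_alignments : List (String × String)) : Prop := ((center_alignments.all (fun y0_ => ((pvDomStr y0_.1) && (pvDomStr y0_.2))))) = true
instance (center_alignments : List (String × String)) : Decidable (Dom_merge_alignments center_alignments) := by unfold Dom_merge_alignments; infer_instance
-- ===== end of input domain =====

-- B precomputes the center's non-gap column index table once and fills each row by
-- zipping it with the aligned sequence (objective: simpler — no counter, no bounds guard).

-- ===== PORT A =====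
-- A's inner loop: scan center chars with column index i and counter center_pos (cp)
def loopA (other : List Char) : List Char → Nat → Nat → List Char → List Char
  | [], _, _, row => row
  | c :: t, i, cp, row =>
    if c ≠ '-' then
      loopA other t (i+1) (cp+1)
        (if cp < other.length ∧ other.getD cp '-' ≠ '-' then row.set i (other.getD cp '-') else row)
    else loopA other t (i+1) cp row

def merge_alignments (center_alignments : List (String × String)) : List String :=
  match center_alignments with
  | [] => []   -- Python raises IndexError here; excluded by Pre_
  | (c0, _) :: _ =>
    let cs := c0.toList
    center_alignments.foldl
      (fun msa p => msa ++ [String.ofList (loopA p.2.toList cs 0 0 (List.replicate cs.length '-'))])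
      [c0]

-- ===== PORT B =====
def positionsB : List Char → Nat → List Nat
  | [], _ => []
  | c :: t, i => if c ≠ '-' then i :: positionsB t (i+1) else positionsB t (i+1)

def loopB : List (Nat × Char) → List Char → List Char
  | [], row => row
  | (col, ch) :: rest, row => loopB rest (if ch ≠ '-' then row.set col ch else row)

def merge_alignments_alt (center_alignments : List (String × String)) : List String :=
  match center_alignments with
  | [] => []   -- Python raises IndexError here; excluded by Pre_
  | (c0, _) :: _ =>
    let cs := c0.toList
    let positions := positionsB cs 0
    center_alignments.foldl
      (fun msa p => msa ++ [String.ofList (loopB (positions.zip p.2.toList) (List.replicate cs.length '-'))])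
      [c0]

-- ===== PRECONDITION & SPEC =====
-- A does center_alignments[0][0]: it raises IndexError exactly on the empty list.
def Pre_merge_alignments (center_alignments : List (String × String)) : Prop :=
  center_alignments ≠ []
instance (center_alignments : List (String × String)) : Decidable (Pre_merge_alignments center_alignments) := by unfold Pre_merge_alignments; infer_instance
def pvWitness_merge_alignments : (List (String × String)) := [("AB-C", "XY-Z"), ("AB-C", "-Q")]

def Spec_merge_alignments (center_alignments : List (String × String)) (out : List String) : Prop := out = merge_alignments_alt center_alignments
instance (center_alignments : List (String × String)) (out : List String) : Decidable (Spec_merge_alignments center_alignments out) := by unfold Spec_merge_alignments; infer_instance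

-- ===== CLAIM =====
def Claim_equal_merge_alignments : Prop := ∀ (center_alignments : List (String × String)), Dom_merge_alignments center_alignments → Pre_merge_alignments center_alignments → Spec_merge_alignments center_alignments (merge_alignments center_alignments)

-- ===== LEMMAS AND PROOFS =====

lemma drop_eq_cons_of_lt (other : List Char) (cp : Nat) (h : cp < other.length) :
    other.drop cp = other.getD cp '-' :: other.drop (cp+1) := by
  rw [List.getD_eq_getElem _ _ h]
  exact (List.drop_eq_getElem_cons h)

lemma loopA_eq_loopB (cs : List Char) :
    ∀ (other : List Char) (i cp : Nat) (row : List Char),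
      loopA other cs i cp row = loopB ((positionsB cs i).zip (other.drop cp)) row := by
  induction cs with
  | nil => intro other i cp row; simp [loopA, positionsB, loopB]
  | cons c t ih =>
    intro other i cp row
    by_cases hc : c = '-'
    · simp [loopA, positionsB, hc, ih]
    · simp only [loopA, positionsB, if_pos (by simpa using hc), ne_eq]
      by_cases hcp : cp < other.length
      · rw [drop_eq_cons_of_lt other cp hcp]
        simp only [List.zip_cons_cons, loopB]
        rw [ih]
        congr 1
        simp [hcp]
      · have h1 : other.drop cp = [] := List.drop_eq_nil_of_le (by omega)
        have h2 : other.drop (cp+1) = [] := List.drop_eq_nil_of_le (by omega)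
        rw [h1, ih, h2]
        simp [loopB, hcp]

-- ===== VERDICT =====
theorem merge_alignments_spec : Claim_equal_merge_alignments := by
  intro ca _ hpre
  unfold Spec_merge_alignments merge_alignments merge_alignments_alt
  match ca with
  | [] => exact absurd rfl hpre
  | (c0, o0) :: rest =>
    simp only []
    congr 1
    funext msa p
    rw [loopA_eq_loopB]
    rfl
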